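-- pv_equiv track=rewrite | github.com/iicarvalho/Inteligencia-Artificial | clustering.py | getMinor
-- ===== SOURCE A (Python) =====
-- def getMinor(matrix):
--     low = 0
--     pos = [0,0]
--     for i in range(len(matrix)):
--         for j in range(len(matrix[i])):
--             if matrix[i][j] > 0 and (matrix[i][j] < low or low == 0):
--                 low = matrix[i][j]
--                 pos[0] = i
--                 pos[1] = j
--     matrix[pos[0]][pos[1]] = -1
--     return pos
-- ===== SOURCE B (Python) =====
-- def getMinor(matrix):
--     # Staged passes: pass 1 computes the smallest positive value in the matrix,
--     # pass 2 searches row by row for its first occurrence (row membership + index).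
--     positives = [v for row in matrix for v in row if v > 0]
--     if positives:
--         m = min(positives)
--         pos = [0, 0]
--         for i, row in enumerate(matrix):
--             if m in row:
--                 pos = [i, row.index(m)]
--                 break
--     else:
--         pos = [0, 0]
--     matrix[pos[0]][pos[1]] = -1
--     return pos
-- ===== Notes on version B (the rewrite author's own statement) =====
-- stated objective: alternative
-- what changed: A's single nested-loop scan carrying a running (low, pos) accumulator with the low==0 sentinel is replaced by two staged passes: first compute the smallest positive value over a flattened value list, then locate its first occurrence row by row via membership test and row.index, breaking at the first hit.
import Mathlib
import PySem

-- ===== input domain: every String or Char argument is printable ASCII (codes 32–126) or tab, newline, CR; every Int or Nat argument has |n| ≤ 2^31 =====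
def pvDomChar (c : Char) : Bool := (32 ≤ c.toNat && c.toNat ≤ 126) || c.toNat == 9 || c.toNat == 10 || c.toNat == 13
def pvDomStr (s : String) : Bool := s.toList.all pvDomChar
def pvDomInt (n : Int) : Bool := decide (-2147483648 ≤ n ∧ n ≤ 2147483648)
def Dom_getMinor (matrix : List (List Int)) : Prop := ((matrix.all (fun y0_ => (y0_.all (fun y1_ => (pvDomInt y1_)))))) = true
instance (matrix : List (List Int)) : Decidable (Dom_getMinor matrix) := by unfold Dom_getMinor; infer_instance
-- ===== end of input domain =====

-- B replaces A's single running-(low,pos) scan by two staged passes: first the smallest positive value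
-- over the flattened values, then a row-by-row search (membership + index) for its first occurrence;
-- equivalence is about the RETURN value (both Pythons also set matrix[pos[0]][pos[1]] = -1).


-- ===== PORT A =====
def getMinor (matrix : List (List Int)) : List Int :=
  -- low = 0; pos = [0,0]; state (low, pos0, pos1)
  let st := (PySem.List.pyRange 0 (PySem.List.len matrix) 1).foldl (fun st i =>
      (PySem.List.pyRange 0 (PySem.List.len (PySem.List.pyGetD matrix i [])) 1).foldl (fun st j =>
        if 0 < PySem.List.pyGetD (PySem.List.pyGetD matrix i []) j 0 ∧
           (PySem.List.pyGetD (PySem.List.pyGetD matrix i []) j 0 < st.1 ∨ st.1 = 0)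
        then (PySem.List.pyGetD (PySem.List.pyGetD matrix i []) j 0, i, j) else st) st)
    ((0 : Int), (0 : Int), (0 : Int))
  [st.2.1, st.2.2]

-- ===== PORT B =====
-- 'for i, row in enumerate(matrix): if m in row: pos = [i, row.index(m)]; break' (pos starts [0,0])
def findFirstPos (m : Int) : List (Int × List Int) → List Int
  | [] => [0, 0]
  | (i, row) :: rest =>
    if row.contains m then
      match PySem.List.index? row m with
      | some j => [i, (j : Int)]
      | none => [i, 0]        -- unreachable: the branch requires m ∈ row
    else findFirstPos m rest

def getMinor_alt (matrix : List (List Int)) : List Int :=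
  let positives := matrix.flatMap (fun row => row.filter (fun v => decide (0 < v)))
  match PySem.List.min? positives (fun v => v) with
  | some m => findFirstPos m (PySem.List.enumerate matrix)
  | none => [0, 0]

-- ===== PRECONDITION & SPEC =====
-- Pre_ excludes exactly the inputs on which A raises IndexError (no positive entry and no cell (0,0)
-- for the unconditional matrix[0][0] = -1 write); B raises there as well.
def Pre_getMinor (matrix : List (List Int)) : Prop :=
  (matrix.any (fun r => r.any (fun v => decide (0 < v)))) = true ∨ matrix.head?.getD [] ≠ []
instance (matrix : List (List Int)) : Decidable (Pre_getMinor matrix) := by unfold Pre_getMinor; infer_instance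
def pvWitness_getMinor : List (List Int) := [[0, 2], [1, -3]]
def Spec_getMinor (matrix : List (List Int)) (out : List Int) : Prop := out = getMinor_alt matrix
instance (matrix : List (List Int)) (out : List Int) : Decidable (Spec_getMinor matrix out) := by unfold Spec_getMinor; infer_instance

-- ===== CLAIM (what is proved, stated in full; the proofs are below) =====
def Claim_equal_getMinor : Prop := ∀ (matrix : List (List Int)), Dom_getMinor matrix → Pre_getMinor matrix → Spec_getMinor matrix (getMinor matrix)

-- ===== LEMMAS AND PROOFS =====

-- A's loop step on a (value, i, j) cell
def stepA (st c : Int × Int × Int) : Int × Int × Int :=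
  if 0 < c.1 ∧ (c.1 < st.1 ∨ st.1 = 0) then c else st

-- min?'s running step with key (·.1)
def stepM (acc : Option (Int × Int × Int)) (c : Int × Int × Int) : Option (Int × Int × Int) :=
  match acc with
  | none => some c
  | some m => if c.1 < m.1 then some c else some m

-- the total running-min step on cells
def step2 (b x : Int × Int × Int) : Int × Int × Int := if x.1 < b.1 then x else b

-- once low is positive, A's fold agrees with the min-fold over the positive cells
lemma foldA_pos (cells : List (Int × Int × Int)) : ∀ (m : Int × Int × Int), 0 < m.1 →
    cells.foldl stepA m = ((cells.filter (fun c => decide (0 < c.1))).foldl stepM (some m)).getD (0, 0, 0) := by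
  induction cells with
  | nil => intro m hm; simp
  | cons c t ih =>
    intro m hm
    by_cases hc : 0 < c.1
    · simp only [List.foldl_cons, List.filter_cons, hc, decide_true, if_true]
      have : stepA m c = if c.1 < m.1 then c else m := by
        simp only [stepA, hc, true_and]
        split_ifs with h1 h2 <;> first | rfl | omega
      rw [this]
      by_cases hlt : c.1 < m.1
      · simp only [hlt, if_true, stepM]
        exact ih c hc
      · simp only [hlt, if_false, stepM]
        exact ih m hm
    · simp only [List.foldl_cons, List.filter_cons, hc, decide_false, Bool.false_eq_true, if_false]
      have : stepA m c = m := by simp [stepA, hc]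
      rw [this]
      exact ih m hm

-- min(…, key) is the stepM fold
lemma min?_stepM (xs : List (Int × Int × Int)) :
    PySem.List.min? xs (fun t => t.1) = xs.foldl stepM none := by
  simp only [PySem.List.min?]
  congr 1
  funext acc x
  cases acc <;> rfl

-- from the initial state, A's fold computes min? of the positive cells (default (0,0,0))
lemma foldA_min (cells : List (Int × Int × Int)) :
    cells.foldl stepA ((0 : Int), (0 : Int), (0 : Int)) =
      (PySem.List.min? (cells.filter (fun c => decide (0 < c.1))) (fun t => t.1)).getD (0, 0, 0) := by
  simp only [min?_stepM]
  induction cells with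
  | nil => simp
  | cons c t ih =>
    by_cases hc : 0 < c.1
    · simp only [List.foldl_cons, List.filter_cons, hc, decide_true, if_true]
      have h1 : stepA ((0 : Int), (0 : Int), (0 : Int)) c = c := by simp [stepA, hc]
      rw [h1]
      show _ = (List.foldl stepM (stepM none c) _).getD _
      exact foldA_pos t c hc
    · simp only [List.foldl_cons, List.filter_cons, hc, decide_false, Bool.false_eq_true, if_false]
      have h1 : stepA ((0 : Int), (0 : Int), (0 : Int)) c = ((0 : Int), (0 : Int), (0 : Int)) := by
        simp [stepA, hc]
      rw [h1, ih]

-- the row-major cells of an enumerated row list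
def cellsOfE (rows : List (Int × List Int)) : List (Int × Int × Int) :=
  rows.flatMap (fun p => (PySem.List.enumerate p.2).map (fun q => (q.2, p.1, q.1)))

-- the row-major cells of the matrix
def cellsOf (matrix : List (List Int)) : List (Int × Int × Int) :=
  cellsOfE (PySem.List.enumerate matrix)

-- the positive cells in row-major order
def posCells (matrix : List (List Int)) : List (Int × Int × Int) :=
  (cellsOf matrix).filter (fun c => decide (0 < c.1))

-- A's nested index loops are the cells fold
lemma A_cells (matrix : List (List Int)) :
    getMinor matrix = (let st := (cellsOf matrix).foldl stepA ((0 : Int), (0 : Int), (0 : Int));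
      [st.2.1, st.2.2]) := by
  simp only [cellsOf, cellsOfE, List.foldl_flatMap, List.foldl_map]
  have hfun : (fun (st : Int × Int × Int) (p : Int × List Int) =>
        List.foldl (fun st (q : Int × Int) => stepA st (q.2, p.1, q.1)) st (PySem.List.enumerate p.2))
      = fun st p => List.foldl (fun st j => stepA st (PySem.List.pyGetD p.2 j 0, p.1, j)) st
          (PySem.List.pyRange 0 (PySem.List.len p.2) 1) := by
    funext st p
    rw [PySem.List.enumerate_eq_map_pyRange p.2 (0 : Int), List.foldl_map]
  rw [hfun, PySem.List.enumerate_eq_map_pyRange matrix ([] : List Int), List.foldl_map]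
  simp only [getMinor, stepA]

-- row-level: values of the positive cells of one enumerated row are the row's positive values
lemma rowValues (i : Int) : ∀ (row : List Int) (s : Int),
    ((((PySem.List.enumerate row s).map (fun q => (q.2, i, q.1))).filter
        (fun c => decide (0 < c.1))).map (fun c => c.1)) = row.filter (fun v => decide (0 < v)) := by
  intro row
  induction row with
  | nil => intro s; simp
  | cons x t ih =>
    intro s
    rw [PySem.List.enumerate_cons]
    by_cases hx : 0 < x
    · simpa [hx] using ih (s + 1)
    · simpa [hx] using ih (s + 1)

lemma values_eq_aux : ∀ (rows : List (List Int)) (s : Int),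
    rows.flatMap (fun row => row.filter (fun v => decide (0 < v))) =
      ((cellsOfE (PySem.List.enumerate rows s)).filter (fun c => decide (0 < c.1))).map
        (fun c => c.1) := by
  intro rows
  induction rows with
  | nil => intro s; simp [cellsOfE]
  | cons row rest ih =>
    intro s
    rw [PySem.List.enumerate_cons]
    simp only [cellsOfE, List.flatMap_cons, List.filter_append, List.map_append]
    rw [rowValues s row 0]
    exact congrArg _ (ih (s + 1))

-- B's value pass lists exactly the values of the positive cells, in order
lemma values_eq (matrix : List (List Int)) :
    matrix.flatMap (fun row => row.filter (fun v => decide (0 < v))) =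
      (posCells matrix).map (fun c => c.1) := by
  simpa [posCells, cellsOf] using values_eq_aux matrix 0

-- min?'s running step at the value level
def stepI (a : Option Int) (v : Int) : Option Int :=
  match a with
  | none => some v
  | some m => if v < m then some v else some m

lemma min?_stepI (xs : List Int) :
    PySem.List.min? xs (fun v => v) = xs.foldl stepI none := by
  simp only [PySem.List.min?]
  congr 1
  funext acc x
  cases acc <;> rfl

lemma min?_map_aux : ∀ (l : List (Int × Int × Int)) (acc : Option (Int × Int × Int)),
    List.foldl stepI (acc.map (fun c => c.1)) (l.map (fun c => c.1)) =
      (List.foldl stepM acc l).map (fun c => c.1) := by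
  intro l
  induction l with
  | nil => intro acc; simp
  | cons x t ih =>
    intro acc
    have hstep : stepI (acc.map (fun c => c.1)) x.1 = (stepM acc x).map (fun c => c.1) := by
      cases acc with
      | none => rfl
      | some m =>
        simp only [Option.map_some, stepI, stepM]
        split_ifs <;> rfl
    simp only [List.map_cons, List.foldl_cons, hstep, ih]

-- min over the mapped values is the mapped min over cells
lemma min?_map (l : List (Int × Int × Int)) :
    PySem.List.min? (l.map (fun c => c.1)) (fun v => v) =
      (PySem.List.min? l (fun t => t.1)).map (fun c => c.1) := by
  rw [min?_stepI, min?_stepM]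
  have h := min?_map_aux l none
  rw [Option.map_none] at h
  exact h

-- feeding stepM a some-accumulator is the total running min
lemma foldM_some : ∀ (l : List (Int × Int × Int)) (a : Int × Int × Int),
    List.foldl stepM (some a) l = some (l.foldl step2 a) := by
  intro l
  induction l with
  | nil => intro a; rfl
  | cons x t ih =>
    intro a
    have : stepM (some a) x = some (step2 a x) := by
      simp only [stepM, step2]; split_ifs <;> rfl
    simp only [List.foldl_cons, this, ih]

lemma step2_le_init : ∀ (l : List (Int × Int × Int)) (a : Int × Int × Int),
    (l.foldl step2 a).1 ≤ a.1 := by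
  intro l
  induction l with
  | nil => intro a; simp
  | cons x t ih =>
    intro a
    have h2 : (step2 a x).1 ≤ a.1 := by simp only [step2]; split_ifs <;> omega
    exact le_trans (ih (step2 a x)) h2

-- the running min is the FIRST element attaining its value
lemma firstMin : ∀ (l : List (Int × Int × Int)) (a : Int × Int × Int),
    List.find? (fun x => decide (x.1 = (l.foldl step2 a).1)) (a :: l) = some (l.foldl step2 a) := by
  intro l
  induction l with
  | nil => intro a; simp
  | cons x t ih =>
    intro a
    simp only [List.foldl_cons]
    by_cases hlt : x.1 < a.1
    · have ha' : step2 a x = x := by simp [step2, hlt]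
      simp only [ha']
      have hc : (t.foldl step2 x).1 ≤ x.1 := step2_le_init t x
      have hne : ¬ (a.1 = (t.foldl step2 x).1) := by omega
      rw [List.find?_cons_of_neg (by simpa using hne)]
      exact ih x
    · have ha' : step2 a x = a := by simp [step2, hlt]
      simp only [ha']
      have hih := ih a
      by_cases hae : a.1 = (t.foldl step2 a).1
      · have : List.find? (fun y => decide (y.1 = (t.foldl step2 a).1)) (a :: t) = some a := by
          rw [List.find?_cons_of_pos (by simpa using hae)]
        rw [this] at hih
        have haeq : a = t.foldl step2 a := Option.some.inj hih
        rw [List.find?_cons_of_pos (by simpa using hae)]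
        exact congrArg some haeq
      · rw [List.find?_cons_of_neg (by simpa using hae)] at hih
        have hc : (t.foldl step2 a).1 ≤ a.1 := step2_le_init t a
        have hxne : ¬ (x.1 = (t.foldl step2 a).1) := by omega
        rw [List.find?_cons_of_neg (by simpa using hae),
            List.find?_cons_of_neg (by simpa using hxne)]
        exact hih

-- searching one mapped enumerated row for value m is row.index
lemma rowFind (i m : Int) : ∀ (row : List Int) (s : Int),
    List.find? (fun c => decide (c.1 = m)) ((PySem.List.enumerate row s).map (fun q => (q.2, i, q.1)))
      = (PySem.List.index? row m).map (fun j : Nat => ((m, i, s + (j : Int)) : Int × Int × Int)) := by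
  intro row
  induction row with
  | nil => intro s; simp [PySem.List.index?_eq_idxOf?]
  | cons x t ih =>
    intro s
    rw [PySem.List.enumerate_cons]
    by_cases hx : x = m
    · subst hx
      rw [PySem.List.index?_cons_self]
      simp
    · rw [PySem.List.index?_cons_of_ne t hx]
      simp only [List.map_cons]
      rw [List.find?_cons_of_neg (by simp [hx]), ih (s + 1)]
      cases PySem.List.index? t m with
      | none => rfl
      | some j =>
        simp only [Option.map_some]
        have : s + 1 + (j : Int) = s + ((j : Nat) + 1 : Nat) := by push_cast; ring
        rw [this]

-- B's break-loop over the rows is find? over the flattened cells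
lemma findPos_eq (m : Int) : ∀ (rows : List (Int × List Int)),
    findFirstPos m rows =
      (match List.find? (fun c => decide (c.1 = m)) (cellsOfE rows) with
        | some c => [c.2.1, c.2.2]
        | none => [0, 0]) := by
  intro rows
  induction rows with
  | nil => simp [findFirstPos, cellsOfE]
  | cons p rest ih =>
    obtain ⟨i, row⟩ := p
    simp only [cellsOfE, List.flatMap_cons, List.find?_append]
    rw [rowFind i m row 0]
    by_cases hm : m ∈ row
    · have hcont : row.contains m = true := by simpa using hm
      have hsome : (PySem.List.index? row m).isSome := by
        rw [PySem.List.index?_isSome_iff]; exact hm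
      obtain ⟨j, hj⟩ := Option.isSome_iff_exists.mp hsome
      simp only [findFirstPos, hcont, if_true, hj, Option.map_some]
      norm_num
    · have hcont : row.contains m = false := by simpa using hm
      have hnone : PySem.List.index? row m = none := by
        rw [PySem.List.index?_eq_none_iff]; exact hm
      simp only [findFirstPos, hcont, Bool.false_eq_true, if_false, hnone, Option.map_none,
        Option.none_or]
      exact ih

-- ===== VERDICT (by name: the statement is the Claim_ definition above) =====
theorem getMinor_spec : Claim_equal_getMinor := by
  intro matrix _ _
  show getMinor matrix = getMinor_alt matrix
  rw [A_cells]
  simp only [foldA_min]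
  show (((PySem.List.min? (posCells matrix) fun t => t.1).getD (0, 0, 0)).2.1 ::
      [((PySem.List.min? (posCells matrix) fun t => t.1).getD (0, 0, 0)).2.2]) = _
  simp only [getMinor_alt, values_eq, min?_map]
  cases h : PySem.List.min? (posCells matrix) (fun t => t.1) with
  | none => simp
  | some c =>
    simp only [Option.map_some, Option.getD_some]
    -- c is a positive cell
    have hmem : c ∈ posCells matrix := PySem.List.min?_mem h
    have hpos : 0 < c.1 := by
      have := List.of_mem_filter hmem
      simpa using this
    -- B's search finds exactly c
    rw [show PySem.List.enumerate matrix = PySem.List.enumerate matrix 0 from rfl,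
        findPos_eq c.1 (PySem.List.enumerate matrix 0)]
    have hfind : List.find? (fun q => decide (q.1 = c.1)) (cellsOfE (PySem.List.enumerate matrix 0))
        = some c := by
      have hff : List.find? (fun q => decide (q.1 = c.1)) (posCells matrix) = some c := by
        -- posCells is nonempty; use the fold characterisation
        rcases hl : posCells matrix with _ | ⟨a, t⟩
        · rw [hl] at h; rw [min?_stepM] at h; simp at h
        · rw [hl] at h
          rw [min?_stepM] at h
          simp only [List.foldl_cons] at h
          have : List.foldl stepM (some a) t = some (t.foldl step2 a) := foldM_some t a
          rw [show stepM none a = some a from rfl, this] at h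
          have hc : c = t.foldl step2 a := (Option.some.inj h).symm
          rw [hc]
          exact firstMin t a
      rw [posCells, List.find?_filter] at hff
      rw [← hff, cellsOf]
      congr 1
      funext q
      by_cases hq : q.1 = c.1
      · simp [hq, hpos]
      · simp [hq]
    rw [hfind]
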